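-- pv_equiv track=rewrite | github.com/152334H/exercises | leetcode/decode-the-slanted-ciphertext.py | decodeCiphertext
-- ===== SOURCE A (Python) =====
-- def decodeCiphertext(encodedText: str, rows: int) -> str:
--     # braindead simple: convert the text to the grid,
--     # then read off of the grid and strip trailing spaces.
--     cols = len(encodedText) // rows
--     if cols == 0 or rows == 0: return ''
--     grid = [encodedText[i:i+cols] for i in range(0, len(encodedText), cols)]
--     s = []
--     for c in range(cols):
--         for r in range(rows):
--             if c+r < cols: s.append(grid[r][c+r])
--     return ''.join(s).rstrip()
-- ===== SOURCE B (Python) =====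
-- def decodeCiphertext(encodedText: str, rows: int) -> str:
--     # one pass over the flat string: each char's index determines its diagonal
--     # (diagonal = i % cols - i // cols); group the chars by diagonal, then concatenate
--     cols = len(encodedText) // rows
--     if cols <= 0:
--         return ''
--     diag = {}
--     for i, ch in enumerate(encodedText):
--         c = i % cols - i // cols
--         if c >= 0:
--             diag.setdefault(c, []).append(ch)
--     return ''.join(''.join(diag.get(c, [])) for c in range(cols)).rstrip()
-- ===== Notes on version B (the rewrite author's own statement) =====
-- stated objective: alternative
-- what changed: B replaces A's grid construction and nested diagonal gather (for each diagonal, walk rows) by a single linear scan of the flat string that computes each character's diagonal from its index (c = i%cols - i//cols) and scatters the characters into per-diagonal buckets, which are then concatenated.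
import Mathlib
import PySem

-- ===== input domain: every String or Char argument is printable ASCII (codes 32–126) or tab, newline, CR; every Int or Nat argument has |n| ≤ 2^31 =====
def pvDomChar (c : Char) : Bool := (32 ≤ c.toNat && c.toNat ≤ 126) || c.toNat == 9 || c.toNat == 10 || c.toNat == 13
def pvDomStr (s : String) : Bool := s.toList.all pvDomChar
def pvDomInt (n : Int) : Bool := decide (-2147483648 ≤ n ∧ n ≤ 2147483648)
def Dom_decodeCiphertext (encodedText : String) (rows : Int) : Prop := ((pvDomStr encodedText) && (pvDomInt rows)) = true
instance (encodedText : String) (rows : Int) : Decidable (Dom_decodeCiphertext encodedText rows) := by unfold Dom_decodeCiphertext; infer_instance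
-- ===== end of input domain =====

-- B replaces A's grid + nested diagonal gather by one linear scan of the flat string that
-- computes each character's diagonal from its index and groups the chars by diagonal (alternative decomposition).

-- ===== PORT A =====
def decodeCiphertext (encodedText : String) (rows : Int) : String :=
  let cs := encodedText.toList
  let n : Int := cs.length
  let cols := PySem.Int.floordiv n rows
  if cols = 0 ∨ rows = 0 then "" else
  let grid := (PySem.List.pyRange 0 n cols).map
      (fun i => PySem.List.slice cs (some i) (some (i + cols)))
  let s := (PySem.List.pyRange 0 cols 1).foldl (fun s c =>
      (PySem.List.pyRange 0 rows 1).foldl (fun s r =>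
        if c + r < cols then
          s ++ [PySem.List.pyGetD (PySem.List.pyGetD grid r []) (c + r) ' ']
        else s) s) []
  String.ofList (PySem.Chars.rstrip s)

-- ===== PORT B =====
def decodeCiphertext_alt (encodedText : String) (rows : Int) : String :=
  let cs := encodedText.toList
  let cols := PySem.Int.floordiv (cs.length : Int) rows
  if cols ≤ 0 then "" else
  -- for i, ch in enumerate(encodedText): c = i % cols - i // cols; if c >= 0: diag.setdefault(c, []).append(ch)
  let diag := (PySem.List.enumerate cs).foldl (fun d p =>
      let c := PySem.Int.mod p.1 cols - PySem.Int.floordiv p.1 cols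
      if 0 ≤ c then d.modify c [] (· ++ [p.2]) else d) (PySem.Dict.empty : PySem.Dict Int (List Char))
  -- ''.join(''.join(diag.get(c, [])) for c in range(cols)).rstrip()
  String.ofList (PySem.Chars.rstrip ((PySem.List.pyRange 0 cols 1).flatMap (fun c => diag.getD c [])))

-- ===== PRECONDITION & SPEC =====
-- Python raises ZeroDivisionError on 'len(encodedText) // rows' when rows == 0; nothing else raises.
def Pre_decodeCiphertext (_encodedText : String) (rows : Int) : Prop := rows ≠ 0
instance (encodedText : String) (rows : Int) : Decidable (Pre_decodeCiphertext encodedText rows) := by unfold Pre_decodeCiphertext; infer_instance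
def pvWitness_decodeCiphertext : String × Int := ("coding", 2)

def Spec_decodeCiphertext (encodedText : String) (rows : Int) (out : String) : Prop := out = decodeCiphertext_alt encodedText rows
instance (encodedText : String) (rows : Int) (out : String) : Decidable (Spec_decodeCiphertext encodedText rows out) := by unfold Spec_decodeCiphertext; infer_instance

-- ===== CLAIM (what is proved, stated in full; the proofs are below) =====
def Claim_equal_decodeCiphertext : Prop := ∀ (encodedText : String) (rows : Int), Dom_decodeCiphertext encodedText rows → Pre_decodeCiphertext encodedText rows → Spec_decodeCiphertext encodedText rows (decodeCiphertext encodedText rows)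

-- ===== LEMMAS AND PROOFS =====

-- A's grid lookup grid[r][j] is the flat character cs[r*cols + j]
theorem grid_get (cs : List Char) (rows cols r j : Int)
    (hc : 0 < cols) (hr0 : 0 ≤ r) (hr : r < rows)
    (hmul : rows * cols ≤ (cs.length : Int)) (hj0 : 0 ≤ j) (hj : j < cols) :
    PySem.List.pyGetD
      (PySem.List.pyGetD
        ((PySem.List.pyRange 0 (cs.length : Int) cols).map
          (fun i => PySem.List.slice cs (some i) (some (i + cols)))) r [])
      j ' '
    = PySem.List.pyGetD cs (r * cols + j) ' ' := by
  have hrc : r * cols + cols ≤ (cs.length : Int) := by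
    have h1 : (r + 1) * cols ≤ rows * cols :=
      mul_le_mul_of_nonneg_right (by omega) (le_of_lt hc)
    nlinarith
  have hrcols : 0 ≤ r * cols := mul_nonneg hr0 (le_of_lt hc)
  have hn : (0:Int) < cs.length := by nlinarith
  rw [PySem.List.pyRange_of_pos 0 (cs.length : Int) hc, if_pos hn, List.map_map]
  simp only [sub_zero]
  have hKr : r < ((cs.length : Int) + cols - 1) / cols := by
    have := (Int.le_ediv_iff_mul_le (a := r + 1) (b := (cs.length : Int) + cols - 1) hc).mpr (by nlinarith)
    omega
  rw [PySem.List.pyGetD_eq_getElem _ [] hr0 (by simp; omega)]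
  simp only [List.getElem_map, List.getElem_range, Function.comp]
  have hc2 : (0 : Int) + cols * (r.toNat : Int) = r * cols := by
    rw [Int.toNat_of_nonneg hr0]; ring
  rw [hc2, PySem.List.slice_toNat cs hrcols (by omega)]
  rw [PySem.List.pyGetD_eq_getElem _ ' ' hj0 (by simp [List.length_take, List.length_drop]; omega)]
  rw [List.getElem_take, List.getElem_drop]
  rw [PySem.List.pyGetD_eq_getElem cs ' ' (by omega) (by omega)]
  congr 1
  omega

-- A's inner loop over r, from r0 on, appends exactly the diagonal characters
theorem A_inner (cs : List Char) (rows cols c : Int)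
    (hc : 0 < cols) (hmul : rows * cols ≤ (cs.length : Int))
    (hc0 : 0 ≤ c) (hcc : c < cols)
    (r0 : Int) (hr0 : 0 ≤ r0) (acc : List Char) :
    (PySem.List.pyRange r0 rows 1).foldl (fun s r =>
        if c + r < cols then
          s ++ [PySem.List.pyGetD (PySem.List.pyGetD
            ((PySem.List.pyRange 0 (cs.length : Int) cols).map
              (fun i => PySem.List.slice cs (some i) (some (i + cols)))) r [])
            (c + r) ' ']
        else s) acc
    = acc ++ (PySem.List.pyRange r0 (min rows (cols - c)) 1).map
        (fun r => PySem.List.pyGetD cs (r * cols + c + r) ' ') := by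
  by_cases hlt : r0 < rows
  · rw [PySem.List.pyRange_one_cons hlt, List.foldl_cons]
    by_cases hcr : c + r0 < cols
    · rw [if_pos hcr, A_inner cs rows cols c hc hmul hc0 hcc (r0 + 1) (by omega)]
      rw [PySem.List.pyRange_one_cons (by omega : r0 < min rows (cols - c))]
      rw [grid_get cs rows cols r0 (c + r0) hc hr0 hlt hmul (by omega) hcr]
      have hre : r0 * cols + (c + r0) = r0 * cols + c + r0 := by ring
      rw [hre]
      simp
    · rw [if_neg hcr, A_inner cs rows cols c hc hmul hc0 hcc (r0 + 1) (by omega)]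
      rw [PySem.List.pyRange_one_eq_nil (by omega : min rows (cols - c) ≤ r0),
          PySem.List.pyRange_one_eq_nil (by omega : min rows (cols - c) ≤ r0 + 1)]
  · rw [PySem.List.pyRange_one_eq_nil (by omega),
        PySem.List.pyRange_one_eq_nil (by omega : min rows (cols - c) ≤ r0)]
    simp
termination_by (rows - r0).toNat
decreasing_by all_goals omega

-- div/mod decomposition for a positive divisor
theorem fdm (i cols : Int) (hc : 0 < cols) :
    PySem.Int.floordiv i cols * cols + PySem.Int.mod i cols = i ∧
    0 ≤ PySem.Int.mod i cols ∧ PySem.Int.mod i cols < cols :=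
  ⟨PySem.Int.floordiv_mul_add_mod i cols, PySem.Int.mod_nonneg i hc, PySem.Int.mod_lt i hc⟩

-- the unique decomposition: floordiv/mod of r*cols + j for 0 ≤ j < cols
theorem fdm_inv (r j cols : Int) (hc : 0 < cols) (hj0 : 0 ≤ j) (hj : j < cols) :
    PySem.Int.floordiv (r * cols + j) cols = r ∧ PySem.Int.mod (r * cols + j) cols = j := by
  have hd : PySem.Int.floordiv (r * cols + j) cols = r := by
    rw [PySem.Int.floordiv_eq_iff_of_pos hc]
    constructor <;> nlinarith
  refine ⟨hd, ?_⟩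
  have := PySem.Int.floordiv_mul_add_mod (r * cols + j) cols
  rw [hd] at this
  omega

-- the key i ↦ i % cols - i // cols equals c exactly on the indices r*(cols+1)+c
theorem key_eq_iff (i cols c : Int) (hc : 0 < cols) (hi : 0 ≤ i) (hc0 : 0 ≤ c) :
    (PySem.Int.mod i cols - PySem.Int.floordiv i cols = c) ↔
    (∃ r, 0 ≤ r ∧ c + r < cols ∧ i = r * cols + c + r) := by
  obtain ⟨hdec, hm0, hmc⟩ := fdm i cols hc
  constructor
  · intro hkey
    refine ⟨PySem.Int.floordiv i cols, ?_, by omega, by omega⟩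
    by_contra hneg
    push Not at hneg
    have : PySem.Int.floordiv i cols * cols ≤ (-1) * cols :=
      mul_le_mul_of_nonneg_right (by omega) (le_of_lt hc)
    omega
  · rintro ⟨r, hr0, hrc, rfl⟩
    have : r * cols + c + r = r * cols + (c + r) := by ring
    rw [this] at hdec hm0 hmc ⊢
    obtain ⟨hq, hm⟩ := fdm_inv r (c + r) cols hc (by omega) hrc
    rw [hq, hm]
    omega

-- drop a prefix of the range containing no matches of the filter
theorem filter_skip (p : Int → Bool) (a b n : Int) (hab : a ≤ b)
    (h : ∀ i, a ≤ i → i < b → p i = false) :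
    (PySem.List.pyRange a n 1).filter p = (PySem.List.pyRange b n 1).filter p := by
  by_cases hlt : a < b
  · by_cases han : a < n
    · rw [PySem.List.pyRange_one_cons han, List.filter_cons, h a le_rfl hlt]
      simp only [Bool.false_eq_true, if_false]
      exact filter_skip p (a + 1) b n (by omega) (fun i h1 h2 => h i (by omega) h2)
    · rw [PySem.List.pyRange_one_eq_nil (by omega), PySem.List.pyRange_one_eq_nil (by omega)]
  · have : a = b := by omega
    rw [this]
termination_by (b - a).toNat
decreasing_by omega

-- the indices of diagonal c inside [r0*(cols+1)+c, n) are exactly r*(cols+1)+c, r0 ≤ r < min rows (cols-c)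
theorem filter_diag (n cols rows c : Int) (hcols : 0 < cols) (hrows : 0 < rows)
    (hn1 : rows * cols ≤ n) (hn2 : n < rows * cols + rows)
    (hc : 0 ≤ c) (hcc : c < cols) (r0 : Int) (hr0 : 0 ≤ r0) :
    (PySem.List.pyRange (r0 * cols + c + r0) n 1).filter
        (fun i => decide (PySem.Int.mod i cols - PySem.Int.floordiv i cols = c))
    = (PySem.List.pyRange r0 (min rows (cols - c)) 1).map (fun r => r * cols + c + r) := by
  by_cases hK : r0 < min rows (cols - c)
  · -- head element r0*(cols+1)+c matches
    have hmin1 := min_le_left rows (cols - c)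
    have hmin2 := min_le_right rows (cols - c)
    have hstart : r0 * cols + c + r0 < n := by
      nlinarith [mul_le_mul_of_nonneg_right (show r0 ≤ rows - 1 by omega) (le_of_lt hcols)]
    have hkey : PySem.Int.mod (r0 * cols + c + r0) cols - PySem.Int.floordiv (r0 * cols + c + r0) cols = c := by
      rw [key_eq_iff _ _ _ hcols (by positivity) hc]
      exact ⟨r0, hr0, by omega, rfl⟩
    rw [PySem.List.pyRange_one_cons hstart, List.filter_cons, if_pos (by simpa using hkey)]
    rw [PySem.List.pyRange_one_cons hK, List.map_cons]
    congr 1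
    -- skip (r0*(cols+1)+c, (r0+1)*(cols+1)+c): no index there has key c
    rw [filter_skip _ (r0 * cols + c + r0 + 1) ((r0 + 1) * cols + c + (r0 + 1)) n
      (by nlinarith)
      (by
        intro i h1 h2
        simp only [decide_eq_false_iff_not]
        intro hkey2
        rw [key_eq_iff _ _ _ hcols (by have := mul_nonneg hr0 (le_of_lt hcols); omega) hc] at hkey2
        obtain ⟨r, hrr0, hrc2, rfl⟩ := hkey2
        have h3 : r0 * cols + r0 < r * cols + r := by omega
        have h4 : r * cols + r < (r0 + 1) * cols + (r0 + 1) := by omega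
        have h5 : r0 < r := by
          by_contra hno
          push Not at hno
          have := mul_le_mul_of_nonneg_right hno (le_of_lt hcols)
          omega
        have h6 : r < r0 + 1 := by
          by_contra hno
          push Not at hno
          have := mul_le_mul_of_nonneg_right hno (le_of_lt hcols)
          omega
        omega)]
    have := filter_diag n cols rows c hcols hrows hn1 hn2 hc hcc (r0 + 1) (by omega)
    exact this
  · -- past the end: nothing in [start, n) has key c
    rw [PySem.List.pyRange_one_eq_nil (by omega : min rows (cols - c) ≤ r0), List.map_nil]
    rw [List.filter_eq_nil_iff]
    intro i hi
    rw [PySem.List.mem_pyRange_one] at hi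
    simp only [decide_eq_true_eq]
    intro hkey2
    have hi0 : 0 ≤ i := by nlinarith [mul_nonneg hr0 (le_of_lt hcols)]
    rw [key_eq_iff _ _ _ hcols hi0 hc] at hkey2
    obtain ⟨r, hrr0, hrc2, hieq⟩ := hkey2
    -- i ≥ start forces r ≥ r0 ≥ min rows (cols-c)
    have hge : r0 * cols + r0 ≤ r * cols + r := by omega
    have hrge : r0 ≤ r := by
      by_contra hno
      push Not at hno
      have hle : r ≤ r0 := by omega
      have := mul_le_mul_of_nonneg_right hle (le_of_lt hcols)
      omega
    rcases le_total rows (cols - c) with hm | hm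
    · -- min = rows: i would be ≥ rows*(cols+1)
      rw [min_eq_left hm] at hK
      have : rows * cols ≤ r * cols :=
        mul_le_mul_of_nonneg_right (by omega) (le_of_lt hcols)
      omega
    · -- min = cols - c: c + r ≥ cols contradicts hrc2
      rw [min_eq_right hm] at hK
      omega
termination_by (min rows (cols - c) - r0).toNat
decreasing_by omega

-- B's scatter loop: the bucket of diagonal c collects, in order, the chars whose index has key c
theorem scatter_getD (cols : Int) (ps : List (Int × Char))
    (d : PySem.Dict Int (List Char)) (c : Int) (hc : 0 ≤ c) :
    (ps.foldl (fun d p =>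
        let k := PySem.Int.mod p.1 cols - PySem.Int.floordiv p.1 cols
        if 0 ≤ k then d.modify k [] (· ++ [p.2]) else d) d).getD c []
    = d.getD c [] ++ (ps.filter (fun p =>
        decide (PySem.Int.mod p.1 cols - PySem.Int.floordiv p.1 cols = c))).map (·.2) := by
  induction ps generalizing d with
  | nil => simp
  | cons p ps ih =>
    rw [List.foldl_cons, List.filter_cons, ih]
    by_cases hk : 0 ≤ PySem.Int.mod p.1 cols - PySem.Int.floordiv p.1 cols
    · simp only [if_pos hk]
      rw [PySem.Dict.getD_modify]
      by_cases hkc : PySem.Int.mod p.1 cols - PySem.Int.floordiv p.1 cols = c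
      · rw [if_pos (by omega), if_pos (by simpa using hkc), List.map_cons, hkc]
        simp
      · rw [if_neg (by omega), if_neg (by simpa using hkc)]
    · simp only [if_neg hk]
      rw [if_neg (by simp only [decide_eq_true_eq]; omega)]

-- flatMap respects pointwise equality on members
theorem flatMap_congr_mem {α β : Type} (l : List α) (f g : α → List β)
    (h : ∀ x ∈ l, f x = g x) : l.flatMap f = l.flatMap g := by
  induction l with
  | nil => rfl
  | cons x xs ih =>
    rw [List.flatMap_cons, List.flatMap_cons, h x (by simp), ih (fun y hy => h y (by simp [hy]))]

-- ===== VERDICT (by name: the statement is the Claim_ definition above) =====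
theorem decodeCiphertext_spec : Claim_equal_decodeCiphertext := by
  intro encodedText rows _ hpre
  unfold Pre_decodeCiphertext at hpre
  unfold Spec_decodeCiphertext decodeCiphertext decodeCiphertext_alt
  simp only
  set cs := encodedText.toList with hcs
  set cols := PySem.Int.floordiv (cs.length : Int) rows with hcols
  by_cases hpos : 0 < cols
  · have hrows : 0 < rows := by
      rcases lt_trichotomy rows 0 with h | h | h
      · exfalso
        have hb := PySem.Int.mod_neg_bounds (cs.length : Int) h
        have hd := PySem.Int.floordiv_mul_add_mod (cs.length : Int) rows
        rw [← hcols] at hd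
        have hlen : (0:Int) ≤ cs.length := by positivity
        nlinarith
      · exact absurd h hpre
      · exact h
    have hb := (PySem.Int.floordiv_eq_iff_of_pos (a := (cs.length : Int)) (b := rows) hrows).mp hcols.symm
    have hn1 : rows * cols ≤ (cs.length : Int) := by nlinarith [hb.1]
    have hn2 : (cs.length : Int) < rows * cols + rows := by nlinarith [hb.2]
    rw [if_neg (by omega), if_neg (by omega)]
    have hA : (PySem.List.pyRange 0 cols 1).foldl (fun s c =>
          (PySem.List.pyRange 0 rows 1).foldl (fun s r =>
            if c + r < cols then
              s ++ [PySem.List.pyGetD (PySem.List.pyGetD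
                ((PySem.List.pyRange 0 (cs.length : Int) cols).map
                  (fun i => PySem.List.slice cs (some i) (some (i + cols)))) r [])
                (c + r) ' ']
            else s) s) []
        = (PySem.List.pyRange 0 cols 1).flatMap (fun c =>
            (PySem.List.pyRange 0 (min rows (cols - c)) 1).map
              (fun r => PySem.List.pyGetD cs (r * cols + c + r) ' ')) := by
      rw [← List.nil_append ((PySem.List.pyRange 0 cols 1).flatMap _),
          ← PySem.List.foldl_append_eq_flatMap]
      apply PySem.List.foldl_congr_mem
      intro acc c hcmem
      have hcb := (PySem.List.mem_pyRange_one).mp hcmem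
      exact A_inner cs rows cols c hpos hn1 (by omega) (by omega) 0 le_rfl acc
    have hB : ((PySem.List.pyRange 0 cols 1).flatMap (fun c =>
          ((PySem.List.enumerate cs).foldl (fun d p =>
            let k := PySem.Int.mod p.1 cols - PySem.Int.floordiv p.1 cols
            if 0 ≤ k then d.modify k [] (· ++ [p.2]) else d)
            (PySem.Dict.empty : PySem.Dict Int (List Char))).getD c []))
        = (PySem.List.pyRange 0 cols 1).flatMap (fun c =>
            (PySem.List.pyRange 0 (min rows (cols - c)) 1).map
              (fun r => PySem.List.pyGetD cs (r * cols + c + r) ' ')) := by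
      apply flatMap_congr_mem
      intro c hcmem
      have hcb := (PySem.List.mem_pyRange_one).mp hcmem
      rw [scatter_getD cols (PySem.List.enumerate cs) PySem.Dict.empty c (by omega)]
      rw [PySem.Dict.getD_empty, List.nil_append]
      rw [PySem.List.enumerate_eq_map_pyRange (d := ' ')]
      rw [List.filter_map, List.map_map]
      have hpc : ((fun p : Int × Char =>
            decide (PySem.Int.mod p.1 cols - PySem.Int.floordiv p.1 cols = c)) ∘
            (fun j => (j, PySem.List.pyGetD cs j ' ')))
          = fun i => decide (PySem.Int.mod i cols - PySem.Int.floordiv i cols = c) := rfl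
      rw [hpc]
      have hlen : PySem.List.len cs = (cs.length : Int) := by simp [PySem.List.len]
      rw [hlen]
      rw [filter_skip _ 0 (0 * cols + c + 0) (cs.length : Int) (by omega)
        (by
          intro i h1 h2
          simp only [decide_eq_false_iff_not]
          intro hkey2
          rw [key_eq_iff _ _ _ hpos h1 (by omega)] at hkey2
          obtain ⟨r, hr0, hrc, hieq⟩ := hkey2
          have : 0 ≤ r * cols := mul_nonneg hr0 (le_of_lt hpos)
          omega)]
      rw [filter_diag (cs.length : Int) cols rows c hpos hrows hn1 hn2 (by omega) (by omega) 0 le_rfl]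
      rw [List.map_map]
      rfl
    rw [hA, ← hB]
  · by_cases h0 : cols = 0
    · rw [if_pos (Or.inl h0), if_pos (by omega : cols ≤ 0)]
    · rw [if_neg (by omega), if_pos (by omega : cols ≤ 0)]
      rw [PySem.List.pyRange_one_eq_nil (by omega : cols ≤ 0)]
      rfl
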